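-- pv_equiv track=rewrite | github.com/Mathilde-B19/Decp_augmente | convert_json_to_pandas.py | indice_marche_avec_modification
-- ===== SOURCE A (Python) =====
-- def indice_marche_avec_modification(data: dict) -> list:
--     """
--     Renvoie la liste des indices des marchés contenant une modification
--
--     Retour:
--         - list
--     """
--     liste_indices = []
--     for i in range(len(data["marches"])):
--         # Ajout d'un identifiant technique -> Permet d'avoir une colonne id unique par marché
--         data["marches"][i]["id_technique"] = i
--         if "modifications" in data["marches"][i]:
--             if data["marches"][i]["modifications"]:
--                 liste_indices += [i]
--     return liste_indices
-- ===== SOURCE B (Python) =====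
-- def indice_marche_avec_modification(data: dict) -> list:
--     """Recursive rewrite: process marches by structural recursion on the index,
--     annotating each marche on the way in and building the index list
--     back-to-front by prepending on the way out (no accumulator, no append)."""
--     marches = data["marches"]
--
--     def go(i):
--         if i == len(marches):
--             return []
--         marches[i]["id_technique"] = i
--         rest = go(i + 1)
--         return [i] + rest if marches[i].get("modifications") else rest
--
--     return go(0)
-- ===== Notes on version B (the rewrite author's own statement) =====
-- stated objective: alternative
-- what changed: Replaces A's forward index loop with an accumulator appended at the back by a recursive descent that builds the result back-to-front, prepending each qualifying index on the way out of the recursion; the nested 'in'/truthy check becomes .get truthiness.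
import Mathlib
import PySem

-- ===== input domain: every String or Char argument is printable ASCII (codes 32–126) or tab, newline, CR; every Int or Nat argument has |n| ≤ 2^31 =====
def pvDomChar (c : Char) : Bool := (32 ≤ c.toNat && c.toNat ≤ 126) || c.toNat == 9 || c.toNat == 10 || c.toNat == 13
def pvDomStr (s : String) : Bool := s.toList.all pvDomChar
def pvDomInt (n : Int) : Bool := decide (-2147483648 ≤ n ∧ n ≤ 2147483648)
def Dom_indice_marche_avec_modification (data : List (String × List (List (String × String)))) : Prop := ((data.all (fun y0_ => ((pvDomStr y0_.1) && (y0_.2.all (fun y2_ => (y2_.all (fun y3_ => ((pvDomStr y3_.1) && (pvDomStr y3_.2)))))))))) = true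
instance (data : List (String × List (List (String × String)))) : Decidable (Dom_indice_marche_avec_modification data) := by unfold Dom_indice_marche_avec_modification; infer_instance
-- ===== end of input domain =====

-- B replaces A's forward accumulator loop by a recursive descent building the
-- result back-to-front (alternative decomposition; same cost).
-- Both A and B mutate data["marches"][i] in place (adding "id_technique");
-- the equivalence proved here is about the RETURN value only.
-- ===== PORT A =====
def indice_marche_avec_modification (data : List (String × List (List (String × String)))) : List Int :=
  match data.find? (fun p => p.1 == "marches") with
  | none => []          -- KeyError: excluded by Pre_
  | some (_, marches) =>
      (PySem.List.pyRange 0 marches.length 1).foldl (fun acc i =>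
        match PySem.List.pyGet? marches i with
        | none => acc   -- unreachable: i is in range
        | some m =>
          match m.find? (fun p => p.1 == "modifications") with
          | none => acc                                   -- "modifications" not in marche
          | some (_, v) => if v ≠ "" then acc ++ [i] else acc) []

-- ===== PORT B =====
-- B's inner 'go(i)': structural recursion over the remaining marches, carrying
-- the current index i; prepends i on the way out when .get("modifications") is truthy.
def pvGoB : List (List (String × String)) → Int → List Int
  | [], _ => []
  | m :: rest, i =>
      let r := pvGoB rest (i + 1)
      if (((m.find? (fun p => p.1 == "modifications")).map Prod.snd).getD "") ≠ ""
      then i :: r else r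

def indice_marche_avec_modification_alt (data : List (String × List (List (String × String)))) : List Int :=
  match data.find? (fun p => p.1 == "marches") with
  | none => []          -- KeyError: excluded by Pre_
  | some (_, marches) => pvGoB marches 0

-- ===== PRECONDITION & SPEC =====
-- Pre_ excludes exactly the inputs without a "marches" key, on which Python raises KeyError.
def Pre_indice_marche_avec_modification (data : List (String × List (List (String × String)))) : Prop :=
  "marches" ∈ data.map Prod.fst
instance (data : List (String × List (List (String × String)))) : Decidable (Pre_indice_marche_avec_modification data) := by unfold Pre_indice_marche_avec_modification; infer_instance
def pvWitness_indice_marche_avec_modification : (List (String × List (List (String × String)))) :=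
  [("marches", [[("modifications", "x")], []])]
def Spec_indice_marche_avec_modification (data : List (String × List (List (String × String)))) (out : List Int) : Prop := out = indice_marche_avec_modification_alt data
instance (data : List (String × List (List (String × String)))) (out : List Int) : Decidable (Spec_indice_marche_avec_modification data out) := by unfold Spec_indice_marche_avec_modification; infer_instance

-- ===== CLAIM (what is proved, stated in full; the proofs are below) =====
def Claim_equal_indice_marche_avec_modification : Prop := ∀ (data : List (String × List (List (String × String)))), Dom_indice_marche_avec_modification data → Pre_indice_marche_avec_modification data → Spec_indice_marche_avec_modification data (indice_marche_avec_modification data)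

-- ===== LEMMAS AND PROOFS =====
theorem filter_eq_filterMap_guard {α : Type} (p : α → Prop) [DecidablePred p] (l : List α) :
    l.filter (fun x => decide (p x)) = l.filterMap (fun x => if p x then some x else none) := by
  induction l with
  | nil => rfl
  | cons x xs ih => by_cases h : p x <;> simp [h, ih]

theorem core_fold_eq (ms : List (List (String × String))) :
    (PySem.List.pyRange 0 (ms.length : Int) 1).foldl
      (fun acc i =>
        match PySem.List.pyGet? ms i with
        | none => acc
        | some m =>
          match m.find? (fun p => p.1 == "modifications") with
          | none => acc
          | some (_, v) => if v ≠ "" then acc ++ [i] else acc) []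
  = (PySem.List.enumerate ms).filterMap (fun im =>
      if (((im.2.find? (fun p => p.1 == "modifications")).map Prod.snd).getD "") ≠ ""
      then some im.1 else none) := by
  have hbody : ∀ (acc : List Int), ∀ i ∈ PySem.List.pyRange 0 (ms.length : Int) 1,
      (match PySem.List.pyGet? ms i with
       | none => acc
       | some m =>
         match m.find? (fun p => p.1 == "modifications") with
         | none => acc
         | some (_, v) => if v ≠ "" then acc ++ [i] else acc)
      = (if ((((PySem.List.pyGetD ms i ([] : List (String × String))).find?
              (fun p => p.1 == "modifications")).map Prod.snd).getD "") ≠ ""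
         then acc ++ [i] else acc) := by
    intro acc i hi
    rw [PySem.List.mem_pyRange_one] at hi
    rw [PySem.List.pyGet?_eq_some_getElem ms hi.1 hi.2,
        PySem.List.pyGetD_eq_getElem ms ([] : List (String × String)) hi.1 hi.2]
    cases hfind : (ms[i.toNat].find? (fun p => p.1 == "modifications")) with
    | none => simp [hfind]
    | some pv => rcases pv with ⟨k, v⟩; simp [hfind]
  rw [PySem.List.foldl_congr_mem _ _ _ [] hbody,
      PySem.List.foldl_append_ite_eq_filter,
      PySem.List.enumerate_eq_map_pyRange ms ([] : List (String × String)),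
      List.filterMap_map]
  simp only [List.nil_append, PySem.List.len_eq]
  rw [filter_eq_filterMap_guard]
  rfl

theorem pvGoB_eq_filterMap (ms : List (List (String × String))) :
    ∀ n : Int, pvGoB ms n
      = (PySem.List.enumerate ms n).filterMap (fun im =>
          if (((im.2.find? (fun p => p.1 == "modifications")).map Prod.snd).getD "") ≠ ""
          then some im.1 else none) := by
  induction ms with
  | nil => intro n; simp [pvGoB, PySem.List.enumerate_nil]
  | cons m rest ih =>
      intro n
      rw [PySem.List.enumerate_cons]
      by_cases h : (((m.find? (fun p => p.1 == "modifications")).map Prod.snd).getD "") ≠ "" <;>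
        simp [pvGoB, h, ih (n + 1)]

-- ===== VERDICT (by name: the statement is the Claim_ definition above) =====
theorem indice_marche_avec_modification_spec : Claim_equal_indice_marche_avec_modification := by
  intro data hdom hpre
  unfold Spec_indice_marche_avec_modification indice_marche_avec_modification
    indice_marche_avec_modification_alt
  cases hfind : data.find? (fun p => p.1 == "marches") with
  | none =>
      exfalso
      rw [List.find?_eq_none] at hfind
      obtain ⟨p, hp, hfst⟩ := List.mem_map.mp hpre
      exact hfind p hp (by simp [hfst])
  | some pr =>
      rcases pr with ⟨k, marches⟩
      dsimp only
      rw [pvGoB_eq_filterMap marches 0]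
      simpa using core_fold_eq marches
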